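-- pv_equiv track=rewrite | github.com/tlittle2/Kattis-Solutions-Python | Permuted Arithmetic Sequence/permutedarithmeticsequence.py | findDiffs
-- ===== SOURCE A (Python) =====
-- def findDiffs(lst): #find the distinct differences between the current element and the next element
--     differences = set()
--
--     for i in range(len(lst) - 1):
--         diff = lst[i + 1] - lst[i]
--         differences.add(diff)
--     #if the length is 1, then we have our arithmetic sequence
--     if len(differences) == 1:
--         return True
--     return False
-- ===== SOURCE B (Python) =====
-- def findDiffs(lst):
--     # One short-circuiting pass: compare every consecutive gap with the first gap.
--     if len(lst) < 2:
--         return False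
--     d = lst[1] - lst[0]
--     return all(y - x == d for x, y in zip(lst, lst[1:]))
-- ===== Notes on version B (the rewrite author's own statement) =====
-- stated objective: idiomatic
-- what changed: Replaces the set of all pairwise differences (built via an index loop, then counted) with a single short-circuiting all() over zipped neighbours compared against the fixed first gap; no collection is maintained.
import Mathlib
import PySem

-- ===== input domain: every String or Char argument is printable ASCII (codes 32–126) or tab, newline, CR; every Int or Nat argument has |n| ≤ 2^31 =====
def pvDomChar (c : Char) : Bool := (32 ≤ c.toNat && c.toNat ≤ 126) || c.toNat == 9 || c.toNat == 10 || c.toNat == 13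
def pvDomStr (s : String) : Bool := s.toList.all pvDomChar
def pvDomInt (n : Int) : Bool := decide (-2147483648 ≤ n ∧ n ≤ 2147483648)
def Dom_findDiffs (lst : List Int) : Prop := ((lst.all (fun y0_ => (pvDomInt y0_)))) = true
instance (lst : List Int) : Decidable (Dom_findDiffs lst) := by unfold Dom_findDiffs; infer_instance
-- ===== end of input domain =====

-- B replaces A's set of all consecutive differences with one pass comparing every gap
-- against the first gap (idiomatic; no collection maintained). Both are total.

-- ===== PORT A =====
-- indices i and i+1 produced by range(len(lst)-1) are always in range, so pyGetD's
-- default 0 is never used: the port is exact.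
def findDiffs (lst : List Int) : Bool :=
  let differences : PySem.Set Int :=
    (PySem.List.pyRange 0 ((lst.length : Int) - 1) 1).foldl
      (fun s i => PySem.Set.add s (PySem.List.pyGetD lst (i + 1) 0 - PySem.List.pyGetD lst i 0))
      PySem.Set.empty
  if PySem.Set.len differences = 1 then true else false

-- ===== PORT B =====
-- lst[1] and lst[0] are read only under the length guard, so pyGetD's default is never used.
def findDiffs_alt (lst : List Int) : Bool :=
  if lst.length < 2 then false
  else
    let d := PySem.List.pyGetD lst 1 0 - PySem.List.pyGetD lst 0 0
    (lst.zip (PySem.List.slice lst (some 1) none)).all (fun p => p.2 - p.1 == d)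

-- ===== PRECONDITION & SPEC =====
def Spec_findDiffs (lst : List Int) (out : Bool) : Prop := out = findDiffs_alt lst
instance (lst : List Int) (out : Bool) : Decidable (Spec_findDiffs lst out) := by unfold Spec_findDiffs; infer_instance

-- ===== CLAIM (what is proved, stated in full; the proofs are below) =====
def Claim_equal_findDiffs : Prop := ∀ (lst : List Int), Dom_findDiffs lst → Spec_findDiffs lst (findDiffs lst)

-- ===== LEMMAS AND PROOFS =====

-- The index loop of A produces exactly the list of consecutive differences.
theorem pv_map_range_eq_diffs (lst : List Int) :
    (PySem.List.pyRange 0 ((lst.length : Int) - 1) 1).map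
      (fun i => PySem.List.pyGetD lst (i + 1) 0 - PySem.List.pyGetD lst i 0)
    = (lst.zip lst.tail).map (fun p => p.2 - p.1) := by
  apply List.ext_getElem
  · simp [PySem.List.length_pyRange_one, List.length_zip, List.length_tail]
  · intro k h1 h2
    have hk : k < lst.length - 1 := by
      simp [PySem.List.length_pyRange_one] at h1; omega
    simp only [List.getElem_map, List.getElem_zip, PySem.List.getElem_pyRange_one, zero_add]
    have e1 : PySem.List.pyGetD lst ((k : Int) + 1) 0 = lst[k + 1]'(by omega) := by
      rw [PySem.List.pyGetD_eq_getElem lst 0 (by omega) (by omega)]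
      have ht : ((k : Int) + 1).toNat = k + 1 := by omega
      simp [ht]
    have e2 : PySem.List.pyGetD lst (k : Int) 0 = lst[k]'(by omega) := by
      rw [PySem.List.pyGetD_eq_getElem lst 0 (by omega) (by omega)]
      simp
    rw [e1, e2, List.getElem_tail]

-- set(d :: ds) has exactly one element iff every element of ds equals d.
theorem pv_ofList_len_one (d : Int) (ds : List Int) :
    (PySem.Set.ofList (d :: ds)).length = 1 ↔ ∀ x ∈ ds, x = d := by
  rw [PySem.Set.ofList_cons]
  have h1 : ((d :: (PySem.Set.ofList ds).discard d).length = 1)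
      ↔ (PySem.Set.ofList ds).discard d = [] := by
    simp [List.length_eq_zero_iff]
  rw [h1, List.eq_nil_iff_forall_not_mem]
  constructor
  · intro h x hx
    by_contra hne
    exact h x ((PySem.Set.mem_discard _ _ _).mpr ⟨(PySem.Set.mem_ofList _ _).mpr hx, hne⟩)
  · intro h x hx
    rw [PySem.Set.mem_discard] at hx
    exact hx.2 (h x ((PySem.Set.mem_ofList _ _).mp hx.1))

theorem findDiffs_eq_true_iff (a b : Int) (r : List Int) :
    findDiffs (a :: b :: r) = true ↔ ∀ p ∈ (b :: r).zip r, p.2 - p.1 = b - a := by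
  have hz : ((a :: b :: r).zip (a :: b :: r).tail).map (fun p : Int × Int => p.2 - p.1)
      = (b - a) :: ((b :: r).zip r).map (fun p : Int × Int => p.2 - p.1) := by
    simp [List.zip]
  have hset : findDiffs (a :: b :: r)
      = (if (PySem.Set.ofList ((b - a) ::
            ((b :: r).zip r).map (fun p : Int × Int => p.2 - p.1))).length = 1
         then true else false) := by
    simp only [findDiffs]
    rw [← PySem.Set.update_map_eq_foldl_add, PySem.Set.update_empty,
        pv_map_range_eq_diffs, hz]
    simp [PySem.Set.len]
  rw [hset]
  split_ifs with hc
  · simp only [true_iff]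
    exact fun p hp => (pv_ofList_len_one _ _).mp hc _ (List.mem_map_of_mem hp)
  · simp only [false_iff, not_forall]
    by_contra hall
    push Not at hall
    exact hc ((pv_ofList_len_one _ _).mpr (by
      intro x hx
      obtain ⟨p, hp, rfl⟩ := List.mem_map.mp hx
      exact hall p hp))

theorem findDiffs_alt_eq_true_iff (a b : Int) (r : List Int) :
    findDiffs_alt (a :: b :: r) = true ↔ ∀ p ∈ (b :: r).zip r, p.2 - p.1 = b - a := by
  have hd1 : PySem.List.pyGetD (a :: b :: r) 1 0 = b := by simp [pysem]
  have hd0 : PySem.List.pyGetD (a :: b :: r) 0 0 = a := by simp [pysem]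
  unfold findDiffs_alt
  rw [PySem.List.slice_from_one]
  simp [List.zip, List.all_eq_true, hd1, hd0]

-- ===== VERDICT (by name: the statement is the Claim_ definition above) =====
theorem findDiffs_spec : Claim_equal_findDiffs := by
  intro lst _
  unfold Spec_findDiffs
  match lst with
  | [] => decide
  | [a] =>
      simp [findDiffs, findDiffs_alt, PySem.List.pyRange_one_eq_nil,
            PySem.Set.len, PySem.Set.empty]
  | a :: b :: r =>
      exact Bool.eq_iff_iff.mpr ((findDiffs_eq_true_iff a b r).trans
        (findDiffs_alt_eq_true_iff a b r).symm)
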